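-- pv_equiv track=rewrite | github.com/gahjelle/advent_of_code | python/src/2022/15_beacon_exclusion_zone/aoc202215.py | part2
-- ===== SOURCE A (Python) =====
-- import itertools
--
-- def part2(data):
--     """Solve part 2."""
--     sensors, _, size = data
--
--     # List diagonal lines one unit outside the borders of the diamonds
--     nes = {xy for x, y, d in sensors for xy in [x + y + d + 1, x + y - d - 1]}
--     ses = {xy for x, y, d in sensors for xy in [x - y + d + 1, x - y - d - 1]}
--
--     # Loop over and check candidate intersection points
--     for ne, se in itertools.product(nes, ses):
--         x, y = (ne + se) // 2, (ne - se) // 2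
--         if (
--             0 <= x <= size
--             and 0 <= y <= size
--             and all(abs(sx - x) + abs(sy - y) > d for sx, sy, d in sensors)
--         ):
--             return 4_000_000 * x + y
-- ===== SOURCE B (Python) =====
-- def part2(data):
--     """Solve part 2: row sweep with sorted covered x-intervals per row."""
--     sensors, _, size = data
--     for y in range(size + 1):
--         ivs = []
--         for sx, sy, d in sensors:
--             r = d - abs(sy - y)
--             if r >= 0:
--                 ivs.append((sx - r, sx + r))
--         ivs.sort(key=lambda iv: iv[0])
--         x = 0
--         for lo, hi in ivs:
--             if lo > x:
--                 break
--             if hi >= x: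
--                 x = hi + 1
--         if x <= size:
--             return 4_000_000 * x + y
--     return None
-- ===== Notes on version B (the rewrite author's own statement) =====
-- stated objective: alternative
-- what changed: B replaces A's brute-force test of all intersection points of out-by-one diagonal lines by a row sweep: for each row y it builds the sensors' covered x-intervals, sorts them by left endpoint and sweeps to find the first gap in [0,size].
-- outside the precondition, e.g. on part2(([], [], 0)): A returns None, B returns 0; on part2(([(4, 2, 3), (3, -2, 0)], [], 2)): A returns 2, B returns 0
import Mathlib
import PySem

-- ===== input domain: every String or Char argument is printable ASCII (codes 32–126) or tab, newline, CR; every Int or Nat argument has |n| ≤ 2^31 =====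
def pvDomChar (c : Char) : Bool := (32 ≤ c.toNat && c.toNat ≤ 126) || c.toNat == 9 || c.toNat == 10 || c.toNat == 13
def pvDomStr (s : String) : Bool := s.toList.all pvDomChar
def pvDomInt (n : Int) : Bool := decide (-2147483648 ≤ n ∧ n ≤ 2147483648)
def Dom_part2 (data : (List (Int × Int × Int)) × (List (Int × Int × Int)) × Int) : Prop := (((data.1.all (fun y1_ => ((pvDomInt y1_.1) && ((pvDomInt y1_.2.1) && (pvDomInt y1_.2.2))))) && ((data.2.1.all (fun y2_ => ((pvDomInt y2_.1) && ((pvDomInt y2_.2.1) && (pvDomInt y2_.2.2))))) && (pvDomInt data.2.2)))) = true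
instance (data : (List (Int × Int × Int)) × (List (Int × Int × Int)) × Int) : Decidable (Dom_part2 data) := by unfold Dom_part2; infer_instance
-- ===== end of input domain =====

-- B replaces A's brute-force scan over intersection points of out-by-one diagonals by a
-- per-row sorted-interval sweep; equivalence is proved on the puzzle's promise (Pre_):
-- the box is fully covered, or has exactly one uncovered point lying on out-by-one
-- diagonals of both slopes.

-- ===== PORT A =====
-- Python abs on Int
def pabs (a : Int) : Int := if a < 0 then -a else a

def part2 (data : (List (Int × Int × Int)) × (List (Int × Int × Int)) × Int) : Option Int :=
  let sensors := data.1
  let size := data.2.2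
  -- the two set comprehensions; the Python sets' hash iteration order is immaterial on
  -- Pre_ (every passing candidate pair yields the same point), so the first-hit search
  -- below is exact there
  let nes : PySem.Set Int := PySem.Set.ofList
    (sensors.flatMap (fun t => [t.1 + t.2.1 + t.2.2 + 1, t.1 + t.2.1 - t.2.2 - 1]))
  let ses : PySem.Set Int := PySem.Set.ofList
    (sensors.flatMap (fun t => [t.1 - t.2.1 + t.2.2 + 1, t.1 - t.2.1 - t.2.2 - 1]))
  -- 'for ne, se in itertools.product(nes, ses): … return' = first hit over the pair list
  (nes.flatMap (fun ne => ses.map (fun se => (ne, se)))).findSome? (fun pr =>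
    let x := PySem.Int.floordiv (pr.1 + pr.2) 2
    let y := PySem.Int.floordiv (pr.1 - pr.2) 2
    if 0 ≤ x ∧ x ≤ size ∧ 0 ≤ y ∧ y ≤ size ∧
        (sensors.all (fun t => decide (t.2.2 < pabs (t.1 - x) + pabs (t.2.1 - y)))) = true
    then some (4000000 * x + y) else none)

-- ===== PORT B =====
-- the covered x-intervals of row y ('ivs' loop in Source B)
def rowIvs (sensors : List (Int × Int × Int)) (y : Int) : List (Int × Int) :=
  sensors.foldl (fun ivs t =>
    let r := t.2.2 - pabs (t.2.1 - y)
    if 0 ≤ r then ivs ++ [(t.1 - r, t.1 + r)] else ivs) []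

-- the 'for lo, hi in ivs: …' sweep with break
def sweep : List (Int × Int) → Int → Int
  | [], x => x
  | (lo, hi) :: t, x => if lo > x then x else sweep t (if hi ≥ x then hi + 1 else x)

-- 'for y in range(size + 1): …' with early return, as a lazy counting loop
def altLoop (sensors : List (Int × Int × Int)) (size y : Int) : Option Int :=
  if h : y < size + 1 then
    if sweep (PySem.List.sorted (rowIvs sensors y) (fun iv => iv.1) false) 0 ≤ size then
      some (4000000 * sweep (PySem.List.sorted (rowIvs sensors y) (fun iv => iv.1) false) 0 + y)
    else altLoop sensors size (y + 1)
  else none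
termination_by (size + 1 - y).toNat
decreasing_by omega

def part2_alt (data : (List (Int × Int × Int)) × (List (Int × Int × Int)) × Int) : Option Int :=
  altLoop data.1 data.2.2 0

-- ===== PRECONDITION & SPEC =====
-- Helpers for Pre_.  Pre_ states the puzzle's own promise about the input — the box
-- [0,size]² is either fully covered by the sensor diamonds, or leaves exactly one point
-- uncovered and that point lies on out-by-one diagonals of both slopes.  To keep the
-- condition decidable without enumerating the box, it is phrased through line scans:
-- every uncovered point propagates (walking left/right along its row) to an uncovered
-- point on the column x = 0, the column x = size, or one of the 4n out-by-one diagonals,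
-- so collecting the first two gaps of each of those O(n) lines classifies the box as
-- having 0, 1 or ≥ 2 uncovered points (this equivalence is what the lemmas below prove).
def neVals (sensors : List (Int × Int × Int)) : List Int :=
  sensors.flatMap (fun t => [t.1 + t.2.1 + t.2.2 + 1, t.1 + t.2.1 - t.2.2 - 1])
def seVals (sensors : List (Int × Int × Int)) : List Int :=
  sensors.flatMap (fun t => [t.1 - t.2.1 + t.2.2 + 1, t.1 - t.2.1 - t.2.2 - 1])

-- covered y-intervals of the column x = x0
def colIvs (sensors : List (Int × Int × Int)) (x0 : Int) : List (Int × Int) :=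
  sensors.foldl (fun ivs t =>
    let r := t.2.2 - pabs (t.1 - x0)
    if 0 ≤ r then ivs ++ [(t.2.1 - r, t.2.1 + r)] else ivs) []

-- covered y-intervals of the diagonal { (c + ε*y, y) | y }, ε = ±1
def diagIvs (sensors : List (Int × Int × Int)) (ε c : Int) : List (Int × Int) :=
  sensors.foldl (fun ivs t =>
    let A := ε * (t.1 - c)
    if pabs (A - t.2.1) ≤ t.2.2 then
      ivs ++ [(PySem.Int.floordiv (A + t.2.1 - t.2.2 + 1) 2,
               PySem.Int.floordiv (A + t.2.1 + t.2.2) 2)]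
    else ivs) []

-- the first (at most two) gaps of a set of intervals inside [L, R]
def gaps2 (ivs : List (Int × Int)) (L R : Int) : List Int :=
  if sweep (PySem.List.sorted ivs (fun iv => iv.1) false) L ≤ R then
    if sweep (PySem.List.sorted ivs (fun iv => iv.1) false)
        (sweep (PySem.List.sorted ivs (fun iv => iv.1) false) L + 1) ≤ R then
      [sweep (PySem.List.sorted ivs (fun iv => iv.1) false) L,
       sweep (PySem.List.sorted ivs (fun iv => iv.1) false)
         (sweep (PySem.List.sorted ivs (fun iv => iv.1) false) L + 1)]
    else [sweep (PySem.List.sorted ivs (fun iv => iv.1) false) L]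
  else []

-- the first two uncovered box points of every scan line
def scanPts (sensors : List (Int × Int × Int)) (size : Int) : List (Int × Int) :=
  (gaps2 (colIvs sensors 0) 0 size).map (fun y => ((0 : Int), y))
  ++ (gaps2 (colIvs sensors size) 0 size).map (fun y => (size, y))
  ++ (neVals sensors).flatMap (fun c =>
       (gaps2 (diagIvs sensors (-1) c) (max 0 (c - size)) (min size c)).map (fun y => (c - y, y)))
  ++ (seVals sensors).flatMap (fun c =>
       (gaps2 (diagIvs sensors 1 c) (max 0 (-c)) (min size (size - c))).map (fun y => (c + y, y)))

def preB (sensors : List (Int × Int × Int)) (size : Int) : Bool :=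
  match PySem.List.dedup (scanPts sensors size) with
  | [] => true
  | [p] => decide ((p.1 + p.2) ∈ neVals sensors) && decide ((p.1 - p.2) ∈ seVals sensors)
  | _ => false

-- Pre_ excludes inputs on which A returns, for two reasons: (a) when several points of the
-- box are uncovered, A's answer depends on Python's set iteration order (a hashing
-- accident) while B returns the first gap in row-major order; (b) when the unique
-- uncovered point is not pinned by out-by-one diagonals of both slopes, A returns None
-- while B finds the point.  Pre_ is the puzzle's own guarantee: the box is fully covered,
-- or exactly one point is uncovered and it lies on a ne-type and a se-type out-by-one
-- diagonal.
def Pre_part2 (data : (List (Int × Int × Int)) × (List (Int × Int × Int)) × Int) : Prop :=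
  preB data.1 data.2.2 = true

instance (data : (List (Int × Int × Int)) × (List (Int × Int × Int)) × Int) : Decidable (Pre_part2 data) := by unfold Pre_part2; infer_instance

def pvWitness_part2 : ((List (Int × Int × Int)) × (List (Int × Int × Int)) × Int) :=
  ([(-2, -1, 3), (-2, -1, 4), (0, 2, 3), (3, 3, 1)], [], 2)

def Spec_part2 (data : (List (Int × Int × Int)) × (List (Int × Int × Int)) × Int) (out : Option Int) : Prop := out = part2_alt data
instance (data : (List (Int × Int × Int)) × (List (Int × Int × Int)) × Int) (out : Option Int) : Decidable (Spec_part2 data out) := by unfold Spec_part2; infer_instance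

-- ===== CLAIM (what is proved, stated in full; the proofs are below) =====
def Claim_equal_part2 : Prop := ∀ (data : (List (Int × Int × Int)) × (List (Int × Int × Int)) × Int), Dom_part2 data → Pre_part2 data → Spec_part2 data (part2 data)

-- ===== LEMMAS AND PROOFS =====

-- "no sensor covers (x, y)" as a Boolean (the 'all(...)' test both ports perform)
def uncovB (sensors : List (Int × Int × Int)) (x y : Int) : Bool :=
  sensors.all (fun t => decide (t.2.2 < pabs (t.1 - x) + pabs (t.2.1 - y)))

theorem uncovB_iff (s : List (Int × Int × Int)) (x y : Int) :
    uncovB s x y = true ↔ ∀ t ∈ s, t.2.2 < pabs (t.1 - x) + pabs (t.2.1 - y) := by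
  simp [uncovB]

theorem not_uncov (s : List (Int × Int × Int)) (x y : Int) (h : ¬ uncovB s x y = true) :
    ∃ t ∈ s, pabs (t.1 - x) + pabs (t.2.1 - y) ≤ t.2.2 := by
  rw [uncovB_iff] at h
  simp only [not_forall, not_lt, exists_prop] at h
  exact h

-- a findSome? whose hits all carry the same value returns it as soon as one hit exists
theorem findSome?_unique {α β : Type} (f : α → Option β) (l : List α) (v0 : β)
    (hex : ∃ a ∈ l, f a = some v0) (hall : ∀ a ∈ l, ∀ v, f a = some v → v = v0) :
    l.findSome? f = some v0 := by
  induction l with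
  | nil => simp at hex
  | cons a t ih =>
    rcases hex with ⟨b, hb, hfb⟩
    cases hfa : f a with
    | none =>
      rw [List.findSome?_cons, hfa]
      apply ih
      · rcases List.mem_cons.mp hb with rfl | hbt
        · rw [hfa] at hfb; cases hfb
        · exact ⟨b, hbt, hfb⟩
      · exact fun c hc v hv => hall c (List.mem_cons_of_mem _ hc) v hv
    | some v =>
      have hv0 : v = v0 := hall a List.mem_cons_self v hfa
      rw [List.findSome?_cons, hfa, hv0]

theorem sweep_ge (l : List (Int × Int)) (x : Int) : x ≤ sweep l x := by
  induction l generalizing x with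
  | nil => simp [sweep]
  | cons iv t ih =>
    obtain ⟨lo, hi⟩ := iv
    simp only [sweep]
    split_ifs with h1 h2
    · exact le_refl x
    · exact le_trans (by omega) (ih (hi + 1))
    · exact ih x

def Cov (ivs : List (Int × Int)) (x : Int) : Prop := ∃ iv ∈ ivs, iv.1 ≤ x ∧ x ≤ iv.2

theorem sweep_not_cov (l : List (Int × Int)) (x : Int)
    (h : l.Pairwise (fun a b => a.1 ≤ b.1)) : ¬ Cov l (sweep l x) := by
  induction l generalizing x with
  | nil => rintro ⟨iv, hiv, -⟩; simp at hiv
  | cons iv t ih =>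
    obtain ⟨lo, hi⟩ := iv
    rcases List.pairwise_cons.mp h with ⟨hlo, hp⟩
    simp only [sweep]
    split_ifs with h1 h2
    · rintro ⟨jv, hj, hj1, hj2⟩
      rcases List.mem_cons.mp hj with rfl | hjt
      · simp at hj1; omega
      · have := hlo jv hjt; omega
    · rintro ⟨jv, hj, hj1, hj2⟩
      rcases List.mem_cons.mp hj with rfl | hjt
      · have hge := sweep_ge t (hi + 1); simp at hj2; omega
      · exact ih (hi + 1) hp ⟨jv, hjt, hj1, hj2⟩
    · rintro ⟨jv, hj, hj1, hj2⟩
      rcases List.mem_cons.mp hj with rfl | hjt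
      · have hge := sweep_ge t x; simp at hj2; omega
      · exact ih x hp ⟨jv, hjt, hj1, hj2⟩

theorem sweep_min (l : List (Int × Int)) (x z : Int) (h1 : x ≤ z) (h2 : z < sweep l x) :
    Cov l z := by
  induction l generalizing x with
  | nil => simp only [sweep] at h2; omega
  | cons iv t ih =>
    obtain ⟨lo, hi⟩ := iv
    simp only [sweep] at h2
    split_ifs at h2 with hA hB
    · omega
    · by_cases hz : z ≤ hi
      · exact ⟨(lo, hi), List.mem_cons_self, by simp; omega⟩
      · rcases ih (hi + 1) (by omega) h2 with ⟨jv, hj, hc⟩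
        exact ⟨jv, List.mem_cons_of_mem _ hj, hc⟩
    · rcases ih x h1 h2 with ⟨jv, hj, hc⟩
      exact ⟨jv, List.mem_cons_of_mem _ hj, hc⟩

theorem mem_rowIvs (s : List (Int × Int × Int)) (y : Int) (iv : Int × Int) :
    iv ∈ rowIvs s y ↔ ∃ t ∈ s, 0 ≤ t.2.2 - pabs (t.2.1 - y) ∧
      iv = (t.1 - (t.2.2 - pabs (t.2.1 - y)), t.1 + (t.2.2 - pabs (t.2.1 - y))) := by
  have key : ∀ (l : List (Int × Int × Int)) (acc : List (Int × Int)),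
      l.foldl (fun ivs t =>
        let r := t.2.2 - pabs (t.2.1 - y)
        if 0 ≤ r then ivs ++ [(t.1 - r, t.1 + r)] else ivs) acc
      = acc ++ (l.filter (fun t => decide (0 ≤ t.2.2 - pabs (t.2.1 - y)))).map
          (fun t => (t.1 - (t.2.2 - pabs (t.2.1 - y)), t.1 + (t.2.2 - pabs (t.2.1 - y)))) := by
    intro l
    induction l with
    | nil => simp
    | cons a t ih =>
      intro acc
      simp only [List.foldl_cons, List.filter_cons]
      by_cases h : 0 ≤ a.2.2 - pabs (a.2.1 - y)
      · rw [if_pos h, ih, if_pos (decide_eq_true h), List.map_cons, List.append_assoc,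
          List.singleton_append]
      · rw [if_neg h, ih, if_neg (by simpa using h)]
  rw [rowIvs, key, List.nil_append, List.mem_map]
  constructor
  · rintro ⟨t, ht, rfl⟩
    rcases List.mem_filter.mp ht with ⟨hts, hc⟩
    exact ⟨t, hts, by simpa using hc, rfl⟩
  · rintro ⟨t, hts, hr, rfl⟩
    exact ⟨t, List.mem_filter.mpr ⟨hts, by simpa using hr⟩, rfl⟩

theorem mem_colIvs (s : List (Int × Int × Int)) (x0 : Int) (iv : Int × Int) :
    iv ∈ colIvs s x0 ↔ ∃ t ∈ s, 0 ≤ t.2.2 - pabs (t.1 - x0) ∧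
      iv = (t.2.1 - (t.2.2 - pabs (t.1 - x0)), t.2.1 + (t.2.2 - pabs (t.1 - x0))) := by
  have key : ∀ (l : List (Int × Int × Int)) (acc : List (Int × Int)),
      l.foldl (fun ivs t =>
        let r := t.2.2 - pabs (t.1 - x0)
        if 0 ≤ r then ivs ++ [(t.2.1 - r, t.2.1 + r)] else ivs) acc
      = acc ++ (l.filter (fun t => decide (0 ≤ t.2.2 - pabs (t.1 - x0)))).map
          (fun t => (t.2.1 - (t.2.2 - pabs (t.1 - x0)), t.2.1 + (t.2.2 - pabs (t.1 - x0)))) := by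
    intro l
    induction l with
    | nil => simp
    | cons a t ih =>
      intro acc
      simp only [List.foldl_cons, List.filter_cons]
      by_cases h : 0 ≤ a.2.2 - pabs (a.1 - x0)
      · rw [if_pos h, ih, if_pos (decide_eq_true h), List.map_cons, List.append_assoc,
          List.singleton_append]
      · rw [if_neg h, ih, if_neg (by simpa using h)]
  rw [colIvs, key, List.nil_append, List.mem_map]
  constructor
  · rintro ⟨t, ht, rfl⟩
    rcases List.mem_filter.mp ht with ⟨hts, hc⟩
    exact ⟨t, hts, by simpa using hc, rfl⟩
  · rintro ⟨t, hts, hr, rfl⟩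
    exact ⟨t, List.mem_filter.mpr ⟨hts, by simpa using hr⟩, rfl⟩

theorem mem_diagIvs (s : List (Int × Int × Int)) (ε c : Int) (iv : Int × Int) :
    iv ∈ diagIvs s ε c ↔ ∃ t ∈ s, pabs (ε * (t.1 - c) - t.2.1) ≤ t.2.2 ∧
      iv = (PySem.Int.floordiv (ε * (t.1 - c) + t.2.1 - t.2.2 + 1) 2,
            PySem.Int.floordiv (ε * (t.1 - c) + t.2.1 + t.2.2) 2) := by
  have key : ∀ (l : List (Int × Int × Int)) (acc : List (Int × Int)),
      l.foldl (fun ivs t =>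
        let A := ε * (t.1 - c)
        if pabs (A - t.2.1) ≤ t.2.2 then
          ivs ++ [(PySem.Int.floordiv (A + t.2.1 - t.2.2 + 1) 2,
                   PySem.Int.floordiv (A + t.2.1 + t.2.2) 2)]
        else ivs) acc
      = acc ++ (l.filter (fun t => decide (pabs (ε * (t.1 - c) - t.2.1) ≤ t.2.2))).map
          (fun t => (PySem.Int.floordiv (ε * (t.1 - c) + t.2.1 - t.2.2 + 1) 2,
                     PySem.Int.floordiv (ε * (t.1 - c) + t.2.1 + t.2.2) 2)) := by
    intro l
    induction l with
    | nil => simp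
    | cons a t ih =>
      intro acc
      simp only [List.foldl_cons, List.filter_cons]
      by_cases h : pabs (ε * (a.1 - c) - a.2.1) ≤ a.2.2
      · rw [if_pos h, ih, if_pos (decide_eq_true h), List.map_cons, List.append_assoc,
          List.singleton_append]
      · rw [if_neg h, ih, if_neg (by simpa using h)]
  rw [diagIvs, key, List.nil_append, List.mem_map]
  constructor
  · rintro ⟨t, ht, rfl⟩
    rcases List.mem_filter.mp ht with ⟨hts, hc⟩
    exact ⟨t, hts, by simpa using hc, rfl⟩
  · rintro ⟨t, hts, hr, rfl⟩
    exact ⟨t, List.mem_filter.mpr ⟨hts, by simpa using hr⟩, rfl⟩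

-- the row intervals cover x exactly when some sensor covers (x, y)
theorem cov_rowIvs_iff (s : List (Int × Int × Int)) (y x : Int) :
    Cov (rowIvs s y) x ↔ ∃ t ∈ s, pabs (t.1 - x) + pabs (t.2.1 - y) ≤ t.2.2 := by
  constructor
  · rintro ⟨iv, hiv, hc1, hc2⟩
    rcases (mem_rowIvs s y iv).mp hiv with ⟨t, hts, hr, rfl⟩
    refine ⟨t, hts, ?_⟩
    simp only [pabs] at *
    split_ifs at * <;> omega
  · rintro ⟨t, hts, hd⟩
    refine ⟨(t.1 - (t.2.2 - pabs (t.2.1 - y)), t.1 + (t.2.2 - pabs (t.2.1 - y))),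
      (mem_rowIvs s y _).mpr ⟨t, hts, ?_, rfl⟩, ?_, ?_⟩ <;>
      (simp only [pabs] at *; split_ifs at * <;> omega)

theorem cov_colIvs_iff (s : List (Int × Int × Int)) (x0 y : Int) :
    Cov (colIvs s x0) y ↔ ∃ t ∈ s, pabs (t.1 - x0) + pabs (t.2.1 - y) ≤ t.2.2 := by
  constructor
  · rintro ⟨iv, hiv, hc1, hc2⟩
    rcases (mem_colIvs s x0 iv).mp hiv with ⟨t, hts, hr, rfl⟩
    refine ⟨t, hts, ?_⟩
    simp only [pabs] at *
    split_ifs at * <;> omega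
  · rintro ⟨t, hts, hd⟩
    refine ⟨(t.2.1 - (t.2.2 - pabs (t.1 - x0)), t.2.1 + (t.2.2 - pabs (t.1 - x0))),
      (mem_colIvs s x0 _).mpr ⟨t, hts, ?_, rfl⟩, ?_, ?_⟩ <;>
      (simp only [pabs] at *; split_ifs at * <;> omega)

theorem diag_sensor_iff (ε : Int) (hε : ε = 1 ∨ ε = -1) (sx sy d c y : Int) :
    (pabs (ε * (sx - c) - sy) ≤ d ∧
      PySem.Int.floordiv (ε * (sx - c) + sy - d + 1) 2 ≤ y ∧
      y ≤ PySem.Int.floordiv (ε * (sx - c) + sy + d) 2)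
    ↔ pabs (sx - (c + ε * y)) + pabs (sy - y) ≤ d := by
  rcases hε with rfl | rfl <;>
    · simp only [pabs, one_mul, neg_one_mul,
        PySem.Int.floordiv_eq_ediv_of_pos (show (0:Int) < 2 by norm_num)]
      split_ifs <;> omega

theorem cov_diagIvs_iff (s : List (Int × Int × Int)) (ε c y : Int) (hε : ε = 1 ∨ ε = -1) :
    Cov (diagIvs s ε c) y ↔ ∃ t ∈ s, pabs (t.1 - (c + ε * y)) + pabs (t.2.1 - y) ≤ t.2.2 := by
  constructor
  · rintro ⟨iv, hiv, hc1, hc2⟩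
    rcases (mem_diagIvs s ε c iv).mp hiv with ⟨t, ht, hcond, rfl⟩
    exact ⟨t, ht, (diag_sensor_iff ε hε t.1 t.2.1 t.2.2 c y).mp ⟨hcond, hc1, hc2⟩⟩
  · rintro ⟨t, ht, hd⟩
    have h' := (diag_sensor_iff ε hε t.1 t.2.1 t.2.2 c y).mpr hd
    exact ⟨_, (mem_diagIvs s ε c _).mpr ⟨t, ht, h'.1, rfl⟩, h'.2.1, h'.2.2⟩

theorem uncov_of_not_cov (s : List (Int × Int × Int)) (y x : Int)
    (h : ¬ Cov (rowIvs s y) x) : uncovB s x y = true := by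
  rw [uncovB_iff]
  intro t ht
  by_contra hlt
  rw [not_lt] at hlt
  exact h ((cov_rowIvs_iff s y x).mpr ⟨t, ht, hlt⟩)

theorem cov_sorted_iff (ivs : List (Int × Int)) (x : Int) :
    Cov (PySem.List.sorted ivs (fun iv => iv.1) false) x ↔ Cov ivs x := by
  unfold Cov
  constructor <;> rintro ⟨iv, hiv, hc⟩ <;>
    exact ⟨iv, by simpa [PySem.List.mem_sorted] using hiv, hc⟩

-- the sweep of a row either jumps past the box or lands on an uncovered point
theorem row_sweep_facts (s : List (Int × Int × Int)) (y : Int) :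
    0 ≤ sweep (PySem.List.sorted (rowIvs s y) (fun iv => iv.1) false) 0 ∧
    uncovB s (sweep (PySem.List.sorted (rowIvs s y) (fun iv => iv.1) false) 0) y = true ∧
    (∀ z, 0 ≤ z → z < sweep (PySem.List.sorted (rowIvs s y) (fun iv => iv.1) false) 0 →
      uncovB s z y = false) := by
  refine ⟨sweep_ge _ 0, ?_, ?_⟩
  · apply uncov_of_not_cov
    rw [← cov_sorted_iff]
    exact sweep_not_cov _ 0 (PySem.List.sorted_pairwise (rowIvs s y) (fun iv => iv.1))
  · intro z hz1 hz2
    have hc := (cov_sorted_iff _ _).mp (sweep_min _ 0 z hz1 hz2)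
    rcases (cov_rowIvs_iff s y z).mp hc with ⟨t, hts, hd⟩
    rw [Bool.eq_false_iff]
    intro hu
    exact absurd hd (by have := (uncovB_iff s z y).mp hu t hts; omega)

-- ===== gap-extraction facts =====

theorem gaps2_sound (ivs : List (Int × Int)) (L R g : Int) (hg : g ∈ gaps2 ivs L R) :
    L ≤ g ∧ g ≤ R ∧ ¬ Cov ivs g := by
  have hp := PySem.List.sorted_pairwise ivs (fun iv => iv.1)
  unfold gaps2 at hg
  split_ifs at hg with h1 h2
  · simp only [List.mem_cons, List.not_mem_nil, or_false] at hg
    rcases hg with rfl | rfl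
    · exact ⟨sweep_ge _ L, h1, by rw [← cov_sorted_iff]; exact sweep_not_cov _ L hp⟩
    · refine ⟨?_, h2, by rw [← cov_sorted_iff]; exact sweep_not_cov _ _ hp⟩
      have a1 := sweep_ge (PySem.List.sorted ivs (fun iv => iv.1) false) L
      have a2 := sweep_ge (PySem.List.sorted ivs (fun iv => iv.1) false)
        (sweep (PySem.List.sorted ivs (fun iv => iv.1) false) L + 1)
      omega
  · simp only [List.mem_singleton] at hg
    subst hg
    exact ⟨sweep_ge _ L, h1, by rw [← cov_sorted_iff]; exact sweep_not_cov _ L hp⟩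
  · simp at hg

theorem gaps2_first (ivs : List (Int × Int)) (L R τ : Int)
    (hL : L ≤ τ) (hR : τ ≤ R) (hc : ¬ Cov ivs τ) :
    ∃ g ∈ gaps2 ivs L R, g ≤ τ := by
  have hc' : ¬ Cov (PySem.List.sorted ivs (fun iv => iv.1) false) τ := by
    rw [cov_sorted_iff]; exact hc
  have hg1 : sweep (PySem.List.sorted ivs (fun iv => iv.1) false) L ≤ τ := by
    by_contra hgt
    rw [not_le] at hgt
    exact hc' (sweep_min _ L τ hL hgt)
  refine ⟨sweep (PySem.List.sorted ivs (fun iv => iv.1) false) L, ?_, hg1⟩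
  unfold gaps2
  rw [if_pos (by omega)]
  split_ifs <;> simp

theorem gaps2_pair (ivs : List (Int × Int)) (L R τ1 τ2 : Int) (hlt : τ1 < τ2)
    (h1 : L ≤ τ1 ∧ τ1 ≤ R ∧ ¬ Cov ivs τ1) (h2 : L ≤ τ2 ∧ τ2 ≤ R ∧ ¬ Cov ivs τ2) :
    ∃ g1 g2, g1 ∈ gaps2 ivs L R ∧ g2 ∈ gaps2 ivs L R ∧ g1 < g2 := by
  have hc1 : ¬ Cov (PySem.List.sorted ivs (fun iv => iv.1) false) τ1 := by
    rw [cov_sorted_iff]; exact h1.2.2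
  have hc2 : ¬ Cov (PySem.List.sorted ivs (fun iv => iv.1) false) τ2 := by
    rw [cov_sorted_iff]; exact h2.2.2
  have hg1 : sweep (PySem.List.sorted ivs (fun iv => iv.1) false) L ≤ τ1 := by
    by_contra hgt
    rw [not_le] at hgt
    exact hc1 (sweep_min _ L τ1 h1.1 hgt)
  have hg2 : sweep (PySem.List.sorted ivs (fun iv => iv.1) false)
      (sweep (PySem.List.sorted ivs (fun iv => iv.1) false) L + 1) ≤ τ2 := by
    by_contra hgt
    rw [not_le] at hgt
    exact hc2 (sweep_min _ _ τ2 (by omega) hgt)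
  have hge2 := sweep_ge (PySem.List.sorted ivs (fun iv => iv.1) false)
    (sweep (PySem.List.sorted ivs (fun iv => iv.1) false) L + 1)
  refine ⟨sweep (PySem.List.sorted ivs (fun iv => iv.1) false) L,
    sweep (PySem.List.sorted ivs (fun iv => iv.1) false)
      (sweep (PySem.List.sorted ivs (fun iv => iv.1) false) L + 1), ?_, ?_, ?_⟩
  · unfold gaps2
    rw [if_pos (by omega), if_pos (by omega)]
    exact List.mem_cons_self
  · unfold gaps2
    rw [if_pos (by omega), if_pos (by omega)]
    exact List.mem_cons_of_mem _ List.mem_cons_self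
  · omega

-- one scan line: its collected gaps are in scanPts; if some uncovered parameter exists
-- but is not the unique collected point p, two distinct collected points arise
theorem line_core (s : List (Int × Int × Int)) (size : Int) (ivs : List (Int × Int))
    (L R : Int) (π : Int → Int × Int)
    (hsub : ∀ g ∈ gaps2 ivs L R, π g ∈ scanPts s size)
    (hinj : ∀ g1 g2, π g1 = π g2 → g1 = g2)
    (τ : Int) (hL : L ≤ τ) (hR : τ ≤ R) (hc : ¬ Cov ivs τ)
    (a : Int × Int) (hπa : π τ = a) :
    (∃ q, q ∈ scanPts s size) ∧
    (∀ p, (∀ q ∈ scanPts s size, q = p) → a ≠ p → False) := by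
  obtain ⟨g, hg, hgτ⟩ := gaps2_first ivs L R τ hL hR hc
  constructor
  · exact ⟨π g, hsub g hg⟩
  · intro p hall hne
    have hgp : π g = p := hall _ (hsub g hg)
    obtain ⟨hgL, hgR, hgc⟩ := gaps2_sound ivs L R g hg
    have hgτne : g ≠ τ := fun h => hne (by rw [← hπa, ← h]; exact hgp)
    have hglt : g < τ := lt_of_le_of_ne hgτ hgτne
    obtain ⟨g1, g2, hg1, hg2, h12⟩ :=
      gaps2_pair ivs L R g τ hglt ⟨hgL, hgR, hgc⟩ ⟨hL, hR, hc⟩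
    have e1 : π g1 = p := hall _ (hsub _ hg1)
    have e2 : π g2 = p := hall _ (hsub _ hg2)
    have := hinj g1 g2 (e1.trans e2.symm)
    omega

-- dispatch an uncovered on-scan point to its line
theorem onscan_core (s : List (Int × Int × Int)) (size : Int) (a : Int × Int)
    (h1 : 0 ≤ a.1) (h2 : a.1 ≤ size) (h3 : 0 ≤ a.2) (h4 : a.2 ≤ size)
    (hu : uncovB s a.1 a.2 = true)
    (hOn : a.1 = 0 ∨ a.1 = size ∨ (a.1 + a.2) ∈ neVals s ∨ (a.1 - a.2) ∈ seVals s) :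
    (∃ q, q ∈ scanPts s size) ∧
    (∀ p, (∀ q ∈ scanPts s size, q = p) → a ≠ p → False) := by
  obtain ⟨ax, ay⟩ := a
  simp only at h1 h2 h3 h4 hu hOn
  rcases hOn with h0 | hsz | hne | hse
  · subst h0
    have hcore := line_core s size (colIvs s 0) 0 size (fun y => ((0 : Int), y))
      (fun g hg => by
        unfold scanPts
        exact List.mem_append.mpr (Or.inl (List.mem_append.mpr (Or.inl
          (List.mem_append.mpr (Or.inl (List.mem_map.mpr ⟨g, hg, rfl⟩)))))))
      (fun g1 g2 h => congrArg Prod.snd h)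
      ay h3 h4
      (fun hCov => by
        rcases (cov_colIvs_iff s 0 ay).mp hCov with ⟨t, ht, hle⟩
        have := (uncovB_iff s 0 ay).mp hu t ht
        omega)
      ((0 : Int), ay) rfl
    exact hcore
  · have hcore := line_core s size (colIvs s size) 0 size (fun y => (size, y))
      (fun g hg => by
        unfold scanPts
        exact List.mem_append.mpr (Or.inl (List.mem_append.mpr (Or.inl
          (List.mem_append.mpr (Or.inr (List.mem_map.mpr ⟨g, hg, rfl⟩))))))
      )
      (fun g1 g2 h => congrArg Prod.snd h)
      ay h3 h4
      (fun hCov => by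
        rcases (cov_colIvs_iff s size ay).mp hCov with ⟨t, ht, hle⟩
        rw [← hsz] at hle
        have := (uncovB_iff s ax ay).mp hu t ht
        omega)
      (ax, ay) (by show ((size : Int), ay) = (ax, ay); rw [Prod.mk.injEq]; exact ⟨hsz.symm, rfl⟩)
    exact hcore
  · have hcore := line_core s size (diagIvs s (-1) (ax + ay)) (max 0 (ax + ay - size))
      (min size (ax + ay)) (fun y => (ax + ay - y, y))
      (fun g hg => by
        unfold scanPts
        exact List.mem_append.mpr (Or.inl (List.mem_append.mpr (Or.inr
          (List.mem_flatMap.mpr ⟨ax + ay, hne, List.mem_map.mpr ⟨g, hg, rfl⟩⟩))))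
      )
      (fun g1 g2 h => congrArg Prod.snd h)
      ay (by omega) (by omega)
      (fun hCov => by
        rcases (cov_diagIvs_iff s (-1) (ax + ay) ay (Or.inr rfl)).mp hCov with ⟨t, ht, hle⟩
        have heq : ax + ay + (-1) * ay = ax := by ring
        rw [heq] at hle
        have := (uncovB_iff s ax ay).mp hu t ht
        omega)
      (ax, ay) (by show (ax + ay - ay, ay) = (ax, ay); rw [Prod.mk.injEq]; exact ⟨by ring, rfl⟩)
    exact hcore
  · have hcore := line_core s size (diagIvs s 1 (ax - ay)) (max 0 (-(ax - ay)))
      (min size (size - (ax - ay))) (fun y => (ax - ay + y, y))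
      (fun g hg => by
        unfold scanPts
        exact List.mem_append.mpr (Or.inr
          (List.mem_flatMap.mpr ⟨ax - ay, hse, List.mem_map.mpr ⟨g, hg, rfl⟩⟩))
      )
      (fun g1 g2 h => congrArg Prod.snd h)
      ay (by omega) (by omega)
      (fun hCov => by
        rcases (cov_diagIvs_iff s 1 (ax - ay) ay (Or.inl rfl)).mp hCov with ⟨t, ht, hle⟩
        have heq : ax - ay + 1 * ay = ax := by ring
        rw [heq] at hle
        have := (uncovB_iff s ax ay).mp hu t ht
        omega)
      (ax, ay) (by show (ax - ay + ay, ay) = (ax, ay); rw [Prod.mk.injEq]; exact ⟨by ring, rfl⟩)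
    exact hcore

-- ===== walk lemmas: every uncovered box point propagates along its row to a scan line =====

theorem walk_left_aux (s : List (Int × Int × Int)) (size : Int) :
    ∀ (n : Nat) (x y : Int), x.toNat ≤ n → 0 ≤ x → x ≤ size → 0 ≤ y → y ≤ size →
      uncovB s x y = true →
      ∃ a : Int × Int, a.2 = y ∧ 0 ≤ a.1 ∧ a.1 ≤ x ∧ uncovB s a.1 a.2 = true ∧
        (a.1 = 0 ∨ (a.1 + a.2) ∈ neVals s ∨ (a.1 - a.2) ∈ seVals s) := by
  intro n
  induction n with
  | zero =>
    intro x y hxn hx0 hxs hy0 hys hu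
    have hx : x = 0 := by omega
    subst hx
    exact ⟨(0, y), rfl, le_refl 0, le_refl 0, hu, Or.inl rfl⟩
  | succ n ih =>
    intro x y hxn hx0 hxs hy0 hys hu
    by_cases hx : x = 0
    · subst hx
      exact ⟨(0, y), rfl, le_refl 0, le_refl 0, hu, Or.inl rfl⟩
    · by_cases hu' : uncovB s (x - 1) y = true
      · obtain ⟨a, ha2, ha0, hax, hau, hol⟩ :=
          ih (x - 1) y (by omega) (by omega) (by omega) hy0 hys hu'
        exact ⟨a, ha2, ha0, by omega, hau, hol⟩
      · obtain ⟨t, ht, hcov⟩ := not_uncov s (x - 1) y hu'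
        have hun := (uncovB_iff s x y).mp hu t ht
        refine ⟨(x, y), rfl, by omega, le_refl x, hu, ?_⟩
        by_cases hy : t.2.1 ≤ y
        · refine Or.inr (Or.inl (List.mem_flatMap.mpr ⟨t, ht, ?_⟩))
          simp only [List.mem_cons, List.not_mem_nil, or_false]
          simp only [pabs] at hcov hun
          split_ifs at hcov hun <;> omega
        · refine Or.inr (Or.inr (List.mem_flatMap.mpr ⟨t, ht, ?_⟩))
          simp only [List.mem_cons, List.not_mem_nil, or_false]
          simp only [pabs] at hcov hun
          split_ifs at hcov hun <;> omega

theorem walk_right_aux (s : List (Int × Int × Int)) (size : Int) :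
    ∀ (n : Nat) (x y : Int), (size - x).toNat ≤ n → 0 ≤ x → x ≤ size → 0 ≤ y → y ≤ size →
      uncovB s x y = true →
      ∃ a : Int × Int, a.2 = y ∧ x ≤ a.1 ∧ a.1 ≤ size ∧ uncovB s a.1 a.2 = true ∧
        (a.1 = size ∨ (a.1 + a.2) ∈ neVals s ∨ (a.1 - a.2) ∈ seVals s) := by
  intro n
  induction n with
  | zero =>
    intro x y hxn hx0 hxs hy0 hys hu
    have hx : x = size := by omega
    subst hx
    exact ⟨(x, y), rfl, le_refl x, le_refl x, hu, Or.inl rfl⟩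
  | succ n ih =>
    intro x y hxn hx0 hxs hy0 hys hu
    by_cases hx : x = size
    · subst hx
      exact ⟨(x, y), rfl, le_refl x, le_refl x, hu, Or.inl rfl⟩
    · by_cases hu' : uncovB s (x + 1) y = true
      · obtain ⟨a, ha2, hax, has, hau, hor⟩ :=
          ih (x + 1) y (by omega) (by omega) (by omega) hy0 hys hu'
        exact ⟨a, ha2, by omega, has, hau, hor⟩
      · obtain ⟨t, ht, hcov⟩ := not_uncov s (x + 1) y hu'
        have hun := (uncovB_iff s x y).mp hu t ht
        refine ⟨(x, y), rfl, le_refl x, by omega, hu, ?_⟩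
        by_cases hy : t.2.1 ≤ y
        · refine Or.inr (Or.inr (List.mem_flatMap.mpr ⟨t, ht, ?_⟩))
          simp only [List.mem_cons, List.not_mem_nil, or_false]
          simp only [pabs] at hcov hun
          split_ifs at hcov hun <;> omega
        · refine Or.inr (Or.inl (List.mem_flatMap.mpr ⟨t, ht, ?_⟩))
          simp only [List.mem_cons, List.not_mem_nil, or_false]
          simp only [pabs] at hcov hun
          split_ifs at hcov hun <;> omega

-- ===== soundness of scanPts: every collected point is an uncovered box point =====

theorem scanPts_sound (s : List (Int × Int × Int)) (size : Int) (q : Int × Int)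
    (hq : q ∈ scanPts s size) :
    0 ≤ q.1 ∧ q.1 ≤ size ∧ 0 ≤ q.2 ∧ q.2 ≤ size ∧ uncovB s q.1 q.2 = true := by
  unfold scanPts at hq
  rcases List.mem_append.mp hq with hq' | hD
  · rcases List.mem_append.mp hq' with hq'' | hC
    · rcases List.mem_append.mp hq'' with hA | hB
      · rcases List.mem_map.mp hA with ⟨y, hy, rfl⟩
        obtain ⟨hL, hR, hc⟩ := gaps2_sound _ _ _ _ hy
        refine ⟨le_refl 0, by omega, hL, hR, ?_⟩
        rw [uncovB_iff]
        intro t ht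
        by_contra hlt
        rw [not_lt] at hlt
        exact hc ((cov_colIvs_iff s 0 y).mpr ⟨t, ht, hlt⟩)
      · rcases List.mem_map.mp hB with ⟨y, hy, rfl⟩
        obtain ⟨hL, hR, hc⟩ := gaps2_sound _ _ _ _ hy
        refine ⟨by omega, le_refl size, hL, hR, ?_⟩
        rw [uncovB_iff]
        intro t ht
        by_contra hlt
        rw [not_lt] at hlt
        exact hc ((cov_colIvs_iff s size y).mpr ⟨t, ht, hlt⟩)
    · rcases List.mem_flatMap.mp hC with ⟨c, hcmem, hmap⟩
      rcases List.mem_map.mp hmap with ⟨y, hy, rfl⟩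
      obtain ⟨hL, hR, hc⟩ := gaps2_sound _ _ _ _ hy
      refine ⟨by omega, by omega, by omega, by omega, ?_⟩
      rw [uncovB_iff]
      intro t ht
      by_contra hlt
      rw [not_lt] at hlt
      refine hc ((cov_diagIvs_iff s (-1) c y (Or.inr rfl)).mpr ⟨t, ht, ?_⟩)
      have heq : c + (-1) * y = c - y := by ring
      rw [heq]
      omega
  · rcases List.mem_flatMap.mp hD with ⟨c, hcmem, hmap⟩
    rcases List.mem_map.mp hmap with ⟨y, hy, rfl⟩
    obtain ⟨hL, hR, hc⟩ := gaps2_sound _ _ _ _ hy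
    refine ⟨by omega, by omega, by omega, by omega, ?_⟩
    rw [uncovB_iff]
    intro t ht
    by_contra hlt
    rw [not_lt] at hlt
    refine hc ((cov_diagIvs_iff s 1 c y (Or.inl rfl)).mpr ⟨t, ht, ?_⟩)
    have heq : c + 1 * y = c + y := by ring
    rw [heq]
    omega

-- ===== completeness: the scans classify the box =====

theorem scan_all_covered (s : List (Int × Int × Int)) (size : Int)
    (hnil : scanPts s size = []) :
    ∀ x y : Int, 0 ≤ x → x ≤ size → 0 ≤ y → y ≤ size → uncovB s x y = true → False := by
  intro x y hx0 hxs hy0 hys hu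
  obtain ⟨a, ha2, ha0, hax, hau, hol⟩ :=
    walk_left_aux s size x.toNat x y (le_refl _) hx0 hxs hy0 hys hu
  have hOn : a.1 = 0 ∨ a.1 = size ∨ (a.1 + a.2) ∈ neVals s ∨ (a.1 - a.2) ∈ seVals s := by
    rcases hol with h | h | h
    · exact Or.inl h
    · exact Or.inr (Or.inr (Or.inl h))
    · exact Or.inr (Or.inr (Or.inr h))
  obtain ⟨⟨q, hqmem⟩, -⟩ := onscan_core s size a ha0 (by omega) (by omega) (by omega) hau hOn
  rw [hnil] at hqmem
  exact absurd hqmem (List.not_mem_nil)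

theorem scan_unique (s : List (Int × Int × Int)) (size : Int) (p : Int × Int)
    (hall : ∀ q ∈ scanPts s size, q = p) :
    ∀ q : Int × Int, 0 ≤ q.1 → q.1 ≤ size → 0 ≤ q.2 → q.2 ≤ size →
      uncovB s q.1 q.2 = true → q = p := by
  intro q hx0 hxs hy0 hys hu
  obtain ⟨x, y⟩ := q
  simp only at hx0 hxs hy0 hys hu
  by_contra hne
  by_cases hcase : y = p.2 ∧ p.1 < x
  · obtain ⟨a, ha2, hax, has, hau, hor⟩ :=
      walk_right_aux s size (size - x).toNat x y (le_refl _) hx0 hxs hy0 hys hu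
    have hOn : a.1 = 0 ∨ a.1 = size ∨ (a.1 + a.2) ∈ neVals s ∨ (a.1 - a.2) ∈ seVals s := by
      rcases hor with h | h | h
      · exact Or.inr (Or.inl h)
      · exact Or.inr (Or.inr (Or.inl h))
      · exact Or.inr (Or.inr (Or.inr h))
    have hanep : a ≠ p := by
      intro h
      have := congrArg Prod.fst h
      omega
    obtain ⟨-, hcontra⟩ :=
      onscan_core s size a (by omega) has (by omega) (by omega) hau hOn
    exact hcontra p hall hanep
  · obtain ⟨a, ha2, ha0, hax, hau, hol⟩ :=
      walk_left_aux s size x.toNat x y (le_refl _) hx0 hxs hy0 hys hu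
    have hOn : a.1 = 0 ∨ a.1 = size ∨ (a.1 + a.2) ∈ neVals s ∨ (a.1 - a.2) ∈ seVals s := by
      rcases hol with h | h | h
      · exact Or.inl h
      · exact Or.inr (Or.inr (Or.inl h))
      · exact Or.inr (Or.inr (Or.inr h))
    have hanep : a ≠ p := by
      intro h
      have hf := congrArg Prod.fst h
      have hs2 := congrArg Prod.snd h
      have hyp2 : y = p.2 := by rw [← ha2, hs2]
      have hxnotlt : ¬ p.1 < x := fun hlt => hcase ⟨hyp2, hlt⟩
      have hxne : x ≠ p.1 := by
        intro hx
        apply hne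
        rw [Prod.mk.injEq]
        exact ⟨hx, hyp2⟩
      omega
    obtain ⟨-, hcontra⟩ :=
      onscan_core s size a ha0 (by omega) (by omega) (by omega) hau hOn
    exact hcontra p hall hanep

theorem altLoop_none (sensors : List (Int × Int × Int)) (size : Int) :
    ∀ (n : Nat) (y : Int), (size + 1 - y).toNat ≤ n →
      (∀ y', y ≤ y' → y' ≤ size →
        size < sweep (PySem.List.sorted (rowIvs sensors y') (fun iv => iv.1) false) 0) →
      altLoop sensors size y = none := by
  intro n
  induction n with
  | zero =>
    intro y hn hall
    rw [altLoop, dif_neg (by omega)]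
  | succ n ih =>
    intro y hn hall
    rw [altLoop]
    by_cases h : y < size + 1
    · rw [dif_pos h, if_neg (by have := hall y (le_refl y) (by omega); omega)]
      exact ih (y + 1) (by omega) (fun y' h1 h2 => hall y' (by omega) h2)
    · rw [dif_neg h]

theorem altLoop_some (sensors : List (Int × Int × Int)) (size p1 p2 : Int) :
    ∀ (n : Nat) (y : Int), (size + 1 - y).toNat ≤ n → y ≤ p2 → p2 ≤ size →
      (∀ y', y ≤ y' → y' < p2 →
        size < sweep (PySem.List.sorted (rowIvs sensors y') (fun iv => iv.1) false) 0) →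
      sweep (PySem.List.sorted (rowIvs sensors p2) (fun iv => iv.1) false) 0 = p1 → p1 ≤ size →
      altLoop sensors size y = some (4000000 * p1 + p2) := by
  intro n
  induction n with
  | zero =>
    intro y hn hy hp2s hrows hsw hp1
    exfalso
    omega
  | succ n ih =>
    intro y hn hy hp2s hrows hsw hp1
    rw [altLoop, dif_pos (by omega)]
    by_cases hyp : y = p2
    · subst hyp
      rw [if_pos (by rw [hsw]; exact hp1), hsw]
    · have hlt : y < p2 := by omega
      rw [if_neg (by have := hrows y (le_refl y) hlt; omega)]
      exact ih (y + 1) (by omega) (by omega) hp2s (fun y' h1 h2 => hrows y' (by omega) h2) hsw hp1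

-- ===== VERDICT (by name: the statement is the Claim_ definition above) =====
theorem part2_spec : Claim_equal_part2 := by
  intro data _hdom hpre
  obtain ⟨sensors, rest, size⟩ := data
  unfold Spec_part2
  unfold Pre_part2 preB at hpre
  simp only at hpre
  rcases hD : PySem.List.dedup (scanPts sensors size) with - | ⟨p, ps⟩
  · -- box fully covered: both ports return none
    have hnil : scanPts sensors size = [] := by
      rw [List.eq_nil_iff_forall_not_mem]
      intro q hq
      have := (PySem.List.mem_dedup (scanPts sensors size) q).mpr hq
      rw [hD] at this
      exact absurd this (List.not_mem_nil)
    have hnone : ∀ x y : Int, 0 ≤ x → x ≤ size → 0 ≤ y → y ≤ size →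
        uncovB sensors x y = true → False := scan_all_covered sensors size hnil
    have hA : part2 (sensors, rest, size) = none := by
      simp only [part2]
      rw [List.findSome?_eq_none_iff]
      intro pr hpr
      rw [if_neg]
      rintro ⟨h1, h2, h3, h4, h5⟩
      exact hnone _ _ h1 h2 h3 h4 h5
    have hB : part2_alt (sensors, rest, size) = none := by
      simp only [part2_alt]
      apply altLoop_none sensors size (size + 1 - 0).toNat 0 (le_refl _)
      intro y' hy0 hys
      rcases row_sweep_facts sensors y' with ⟨hge, hu, -⟩
      by_contra hle
      rw [not_lt] at hle
      exact hnone _ y' hge hle hy0 hys hu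
    rw [hA, hB]
  · rcases ps with - | ⟨q2, qs⟩
    swap
    · rw [hD] at hpre; simp at hpre
    -- unique pinned uncovered point p
    rw [hD] at hpre
    simp only [Bool.and_eq_true, decide_eq_true_eq] at hpre
    rcases hpre with ⟨hne, hse⟩
    have hpmem : p ∈ scanPts sensors size := by
      have : p ∈ PySem.List.dedup (scanPts sensors size) := by
        rw [hD]; exact List.mem_singleton_self p
      exact (PySem.List.mem_dedup (scanPts sensors size) p).mp this
    have hp : 0 ≤ p.1 ∧ p.1 ≤ size ∧ 0 ≤ p.2 ∧ p.2 ≤ size ∧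
        uncovB sensors p.1 p.2 = true := scanPts_sound sensors size p hpmem
    have hall : ∀ q ∈ scanPts sensors size, q = p := by
      intro q hq
      have := (PySem.List.mem_dedup (scanPts sensors size) q).mpr hq
      rw [hD] at this
      simpa using this
    have huniq : ∀ q : Int × Int, 0 ≤ q.1 → q.1 ≤ size → 0 ≤ q.2 → q.2 ≤ size →
        uncovB sensors q.1 q.2 = true → q = p := scan_unique sensors size p hall
    have hA : part2 (sensors, rest, size) = some (4000000 * p.1 + p.2) := by
      simp only [part2]
      apply findSome?_unique
      · refine ⟨(p.1 + p.2, p.1 - p.2), ?_, ?_⟩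
        · rw [List.mem_flatMap]
          refine ⟨p.1 + p.2, ?_, ?_⟩
          · exact (PySem.Set.mem_ofList _ _).mpr hne
          · exact List.mem_map.mpr ⟨p.1 - p.2, (PySem.Set.mem_ofList _ _).mpr hse, rfl⟩
        · have hx : PySem.Int.floordiv ((p.1 + p.2) + (p.1 - p.2)) 2 = p.1 := by
            have h2 : (p.1 + p.2) + (p.1 - p.2) = 2 * p.1 := by ring
            rw [h2, PySem.Int.floordiv_eq_ediv_of_pos (by norm_num)]
            omega
          have hy : PySem.Int.floordiv ((p.1 + p.2) - (p.1 - p.2)) 2 = p.2 := by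
            have h2 : (p.1 + p.2) - (p.1 - p.2) = 2 * p.2 := by ring
            rw [h2, PySem.Int.floordiv_eq_ediv_of_pos (by norm_num)]
            omega
          simp only [hx, hy]
          rw [if_pos]
          exact ⟨hp.1, hp.2.1, hp.2.2.1, hp.2.2.2.1, hp.2.2.2.2⟩
      · intro pr hpr v hv
        simp only at hv
        split_ifs at hv with hc
        · rcases hc with ⟨h1, h2, h3, h4, h5⟩
          have := huniq (PySem.Int.floordiv (pr.1 + pr.2) 2, PySem.Int.floordiv (pr.1 - pr.2) 2)
            h1 h2 h3 h4 h5
          simp only [Option.some.injEq] at hv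
          rw [← hv]
          rw [show PySem.Int.floordiv (pr.1 + pr.2) 2 = p.1 from congrArg Prod.fst this,
              show PySem.Int.floordiv (pr.1 - pr.2) 2 = p.2 from congrArg Prod.snd this]
    have hB : part2_alt (sensors, rest, size) = some (4000000 * p.1 + p.2) := by
      simp only [part2_alt]
      rcases row_sweep_facts sensors p.2 with ⟨hge, hu, hmin⟩
      have hrle : sweep (PySem.List.sorted (rowIvs sensors p.2) (fun iv => iv.1) false) 0 ≤ size := by
        by_contra hgt
        rw [not_le] at hgt
        have := hmin p.1 hp.1 (by omega)
        rw [hp.2.2.2.2] at this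
        cases this
      have hrp : sweep (PySem.List.sorted (rowIvs sensors p.2) (fun iv => iv.1) false) 0 = p.1 :=
        congrArg Prod.fst (huniq (sweep (PySem.List.sorted (rowIvs sensors p.2) (fun iv => iv.1) false) 0, p.2)
          hge hrle hp.2.2.1 hp.2.2.2.1 hu)
      refine altLoop_some sensors size p.1 p.2 (size + 1 - 0).toNat 0 (le_refl _) hp.2.2.1 hp.2.2.2.1
        ?_ hrp (hrp ▸ hrle)
      intro y' h0 hlt
      rcases row_sweep_facts sensors y' with ⟨hge', hu', -⟩
      by_contra hle
      rw [not_lt] at hle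
      have heq := huniq (sweep (PySem.List.sorted (rowIvs sensors y') (fun iv => iv.1) false) 0, y')
        hge' hle h0 (by omega) hu'
      have := congrArg Prod.snd heq
      simp only at this
      omega
    rw [hA, hB]
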